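/- GENERATED by mk_final_copies.py from the proof of the farm's unit `start_decoder.F1` (farm:start_decoder.F1.2: Lemmas.lean) as the
   re-elaboration sweep compiled it — do not edit. -/
import Asan.CheckWalk
import Vorbis.Spec.Units.start_decoder_F1

/-!
  Pure lemmas (no walking) for unit `start_decoder.F1`: where `*f` and the frame are, what a batch of stores / a callee's
  footprint inside the "allowed zones" keeps of `Frame` and `Mid`, and the exit assertions `AtF2` / `AtERR` from their parts.
-/

namespace Vorbis.Spec.start_decoder_F1
open X86 X86.User Asan Vorbis Vorbis.Spec Vorbis.Spec.StartDecoder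

/-- **Where the frame and `*f` are**, as arithmetic for `omega`: the steady stack pointer `R = RA − 1480`, the stack room of the
activation, `*f` in the data space (OBR) and off the own activation's stack bytes, `*f` outside the arena's buffer. -/
structure Loc (g : Ghost) (A : Arena × List Obj) : Prop where
  r_ra : g.R + 1480 = g.RA
  r_al : g.R % 8 = 0
  room : 0x700000 + 1888 ≤ g.RA
  top : g.RA + 8 ≤ 0x800000
  f_lo : 0x400000 ≤ g.f
  f_hi : g.f + 1808 ≤ 0xC00000
  f_off : g.RA + 8 ≤ g.f ∨ g.f + 1808 ≤ 0x700000 ∨ 0x800000 ≤ g.f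
  f_out : g.f + 1808 ≤ A.1.B ∨ A.1.B + A.1.L ≤ g.f
  a_hi : A.1.B + A.1.L ≤ 0xC00000

/-- A stack object of the callers' frames lies above the return-address slot. -/
theorem callers_above {u₀ : State} {g : Ghost} {pc : Word} {A : Arena × List Obj} {v : State} (hfr : Frame u₀ g pc A v)
    {o : Obj} (ho : o ∈ stackObjs g.frames) : g.RA + 8 ≤ o.base := by
  unfold stackObjs at ho
  obtain ⟨bF, hbF, hin⟩ := List.mem_flatMap.mp ho
  have hmem : bF ∈ g.frames' := List.mem_cons_of_mem _ hbF
  obtain ⟨k1, k2, _, _, _⟩ := hfr.shadow.stack.active bF hmem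
  have hg := FrameLayout.objsAt_gran k1 k2 hin
  have hc := hfr.callers bF hbF
  have e : o.gLo = o.base / 8 := rfl
  omega

/-- `Loc` from the frame, the hand-over carrier and the point's invariant. -/
theorem loc_of {u₀ : State} {g : Ghost} {pc : Word} {A : Arena × List Obj} {v : State} {k kc z : Nat} {Ac : Arena}
    (hfr : Frame u₀ g pc A v) (hh : g.Hand A) (hm : Mid g k kc z Ac A v.mem) : Loc g A := by
  obtain ⟨h1, h2, h3⟩ := hfr.ra
  obtain ⟨h4, h5⟩ := hfr.r_eq
  have hobr := hm.bits.OBR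
  have hb := hm.arena.bounds
  simp only [depth, steady] at h2 h4
  simp only [voff] at hobr
  have hout := hh.objOut
  simp only [voff] at hout
  refine ⟨h4, h5, h2, h3, hobr.1, hobr.2, ?_, hout, hb.2.2.2⟩
  obtain ⟨o, ho, k1, k2⟩ := hh.obj
  simp only [voff] at k2
  rcases List.mem_append.mp ho with hs | hoth
  · have := callers_above hfr hs
    omega
  · have := hfr.shadow.off o hoth
    unfold OffStack at this
    omega

/-- `Loc` for a later ghost arena (`B`, `L` never change). -/
theorem Loc.grow {g : Ghost} {A A' : Arena × List Obj} (h : Loc g A) (hext : A.1.Extends A'.1) : Loc g A' := by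
  obtain ⟨a1, a2, a3, a4, a5, a6, a7, a8, a9⟩ := h
  refine ⟨a1, a2, a3, a4, a5, a6, a7, ?_, ?_⟩
  · rw [hext.B, hext.L]
    exact a8
  · rw [hext.B, hext.L]
    exact a9

/-- **The zones a store of this segment or a window of one of its callees may lie in**: the stack below the steady stack pointer
(pushed return addresses, the callees' frames); the two spill slots `[R+18H]`, `[R+28H]`; of `*f`: the readers' fields
(`stream`, the paging fields, `eof` + `error`, `acc`, `valid_bits` …), `floor_count`, `floor_config`; and — the allocator only
(`al = true`) — `setup_memory_required`, `setup_offset` and the shadow of the arena's buffer `[Bb, Bb + Ll)`. -/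
def SpanOK (g : Ghost) (al : Bool) (Bb Ll : Nat) (s : Span) : Prop :=
  (g.RA - 1888 ≤ s.lo ∧ s.hi ≤ g.R) ∨
  (g.R + 0x18 ≤ s.lo ∧ s.hi ≤ g.R + 0x1c) ∨
  (g.R + 0x28 ≤ s.lo ∧ s.hi ≤ g.R + 0x2c) ∨
  (g.f + 48 ≤ s.lo ∧ s.hi ≤ g.f + 56) ∨
  (g.f + 84 ≤ s.lo ∧ s.hi ≤ g.f + 96) ∨
  (g.f + 136 ≤ s.lo ∧ s.hi ≤ g.f + 144) ∨
  (g.f + 176 ≤ s.lo ∧ s.hi ≤ g.f + 180) ∨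
  (g.f + 312 ≤ s.lo ∧ s.hi ≤ g.f + 320) ∨
  (g.f + 1484 ≤ s.lo ∧ s.hi ≤ g.f + 1749) ∨
  (g.f + 1752 ≤ s.lo ∧ s.hi ≤ g.f + 1784) ∨
  (al = true ∧ ((g.f + 8 ≤ s.lo ∧ s.hi ≤ g.f + 12) ∨ (g.f + 128 ≤ s.lo ∧ s.hi ≤ g.f + 132) ∨
    (0xC00000 + Bb / 8 ≤ s.lo ∧ s.hi ≤ 0xC00000 + (Bb + Ll + 7) / 8)))

/-- A footprint inside the allowed zones leaves a region alone that meets none of them. -/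
theorem eqOn_of {g : Ghost} {al : Bool} {Bb Ll : Nat} {ws : List Span} {m m' : Mem} (hs : Mem.SameExcept ws m m')
    (hall : ∀ s, s ∈ ws → SpanOK g al Bb Ll s) (lo hi : Nat)
    (hd : ∀ s, SpanOK g al Bb Ll s → hi ≤ s.lo ∨ s.hi ≤ lo) : Mem.EqOn lo hi m m' :=
  hs.eqOn lo hi (fun w hw => hd w (hall w hw))


/-- The windows of `*f` between the allowed zones read the same after a footprint inside the zones. -/
theorem objEq_of {g : Ghost} {A : Arena × List Obj} {al : Bool} {ws : List Span} {m m' : Mem} (hl : Loc g A)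
    (hs : Mem.SameExcept ws m m') (hall : ∀ s, s ∈ ws → SpanOK g al A.1.B A.1.L s) (wins : Wins)
    (hw : ∀ w, w ∈ wins → w.2 ≤ 8 ∨ (12 ≤ w.1 ∧ w.2 ≤ 48) ∨ (56 ≤ w.1 ∧ w.2 ≤ 84) ∨ (96 ≤ w.1 ∧ w.2 ≤ 128) ∨
      (132 ≤ w.1 ∧ w.2 ≤ 136) ∨ (144 ≤ w.1 ∧ w.2 ≤ 176) ∨ (180 ≤ w.1 ∧ w.2 ≤ 312) ∨ (320 ≤ w.1 ∧ w.2 ≤ 1484) ∨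
      (1749 ≤ w.1 ∧ w.2 ≤ 1752) ∨ (1784 ≤ w.1 ∧ w.2 ≤ 1808)) : ObjEq wins m g.f m' g.f := by
  obtain ⟨a1, a2, a3, a4, a5, a6, a7, a8, a9⟩ := hl
  apply ObjEq.of_sameExcept hs
  · intro w hw'
    have := hw w hw'
    omega
  · intro w hw' s hs'
    have h1 := hw w hw'
    have h2 := hall s hs'
    unfold SpanOK at h2
    rcases h2 with h | h | h | h | h | h | h | h | h | h | ⟨_, h | h | h⟩ <;> omega

/-- The slots of the frame that the segment does not write read the same after a footprint inside the zones. -/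
theorem stack_eqOn {g : Ghost} {A : Arena × List Obj} {al : Bool} {ws : List Span} {m m' : Mem} (hl : Loc g A)
    (hs : Mem.SameExcept ws m m') (hall : ∀ s, s ∈ ws → SpanOK g al A.1.B A.1.L s) (lo hi : Nat)
    (h : (g.R + 8 ≤ lo ∧ hi ≤ g.R + 0x18) ∨ (g.R + 0x1c ≤ lo ∧ hi ≤ g.R + 0x28) ∨ (g.R + 0x2c ≤ lo ∧ hi ≤ g.RA + 8)) :
    Mem.EqOn lo hi m m' := by
  obtain ⟨a1, a2, a3, a4, a5, a6, a7, a8, a9⟩ := hl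
  apply eqOn_of hs hall
  intro s h2
  unfold SpanOK at h2
  rcases h2 with h' | h' | h' | h' | h' | h' | h' | h' | h' | h' | ⟨_, h' | h' | h'⟩ <;> omega

/-- The global `log2_4` reads the same after a footprint inside the zones. -/
theorem log2_eqOn {g : Ghost} {A : Arena × List Obj} {al : Bool} {ws : List Span} {m m' : Mem} (hl : Loc g A)
    (hs : Mem.SameExcept ws m m') (hall : ∀ s, s ∈ ws → SpanOK g al A.1.B A.1.L s) :
    Mem.EqOn 0x120640 0x120650 m m' := by
  obtain ⟨a1, a2, a3, a4, a5, a6, a7, a8, a9⟩ := hl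
  apply eqOn_of hs hall
  intro s h2
  unfold SpanOK at h2
  rcases h2 with h' | h' | h' | h' | h' | h' | h' | h' | h' | h' | ⟨_, h' | h' | h'⟩ <;> omega

/-- A footprint inside the zones WITHOUT the allocator's leaves the shadow and the arena's four fields alone. -/
theorem plain_eqOn {g : Ghost} {A : Arena × List Obj} {ws : List Span} {m m' : Mem} (hl : Loc g A)
    (hs : Mem.SameExcept ws m m') (hall : ∀ s, s ∈ ws → SpanOK g false A.1.B A.1.L s) :
    Mem.EqOn 0xC00000 0xE00000 m m' ∧ Mem.EqOn (g.f + 112) (g.f + 136) m m' := by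
  obtain ⟨a1, a2, a3, a4, a5, a6, a7, a8, a9⟩ := hl
  constructor
  · apply eqOn_of hs hall
    intro s h2
    unfold SpanOK at h2
    rcases h2 with h' | h' | h' | h' | h' | h' | h' | h' | h' | h' | ⟨hf, _⟩
    all_goals first | omega | exact absurd hf (by decide)
  · apply eqOn_of hs hall
    intro s h2
    unfold SpanOK at h2
    rcases h2 with h' | h' | h' | h' | h' | h' | h' | h' | h' | h' | ⟨hf, _⟩
    all_goals first | omega | exact absurd hf (by decide)

/-- **FRAME (the common part of every cut point) over a footprint inside the zones**: the saved registers, the return address, the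
shadow index, `log2_4` and the function's footprint so far are carried; what is about the new state (rip, rsp, the code, the ABI
invariant, the shadow layer for the possibly grown object list) is given. -/
theorem frame_carry {u₀ : State} {g : Ghost} {pc pc' : Word} {A A' : Arena × List Obj} {v w : State} {al : Bool}
    {ws : List Span} (hfr : Frame u₀ g pc A v) (hl : Loc g A) (hs : Mem.SameExcept ws v.mem w.mem)
    (hall : ∀ s, s ∈ ws → SpanOK g al A.1.B A.1.L s) (hrip : w.rip = pc') (hrsp : w.reg .rsp = addr g.R)
    (hcode : CodeOK u₀ w.mem) (hinv : abiInv w) (hsh : ShadowInv A'.2 g.frames' g.R w.mem)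
    (hoff : ∀ o, o ∈ A'.2 → L.textHi ≤ o.base) (hext : A.1.Extends A'.1) : Frame u₀ g pc' A' w := by
  have hl' := hl
  obtain ⟨a1, a2, a3, a4, a5, a6, a7, a8, a9⟩ := hl'
  have e8 := stack_eqOn hl hs hall (g.R + 8) (g.R + 16) (by omega)
  have es := stack_eqOn hl hs hall (g.R + 0x598) (g.R + 0x5d0) (by omega)
  refine
    { entry := hfr.entry
      rip := hrip
      rsp := hrsp
      shadowIdx := ?_
      saved_rbx := ?_
      saved_rbp := ?_
      saved_r12 := ?_
      saved_r13 := ?_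
      saved_r14 := ?_
      saved_r15 := ?_
      saved_ra := ?_
      code := hcode
      inv := hinv
      shadow := hsh
      offText := hoff
      ext := hfr.ext.trans hext
      callers := hfr.callers
      sh7 := ?_
      same := ?_ }
  · rw [e8.u64 _ (by omega) (by omega) (by omega)]
    exact hfr.shadowIdx
  · rw [es.u64 _ (by omega) (by omega) (by omega)]
    exact hfr.saved_rbx
  · rw [es.u64 _ (by omega) (by omega) (by omega)]
    exact hfr.saved_rbp
  · rw [es.u64 _ (by omega) (by omega) (by omega)]
    exact hfr.saved_r12
  · rw [es.u64 _ (by omega) (by omega) (by omega)]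
    exact hfr.saved_r13
  · rw [es.u64 _ (by omega) (by omega) (by omega)]
    exact hfr.saved_r14
  · rw [es.u64 _ (by omega) (by omega) (by omega)]
    exact hfr.saved_r15
  · rw [es.u64 _ (by omega) (by omega) (by omega)]
    exact hfr.saved_ra
  · have el := log2_eqOn hl hs hall
    intro i hi
    have e0 : Vorbis.Globals.log2_4.beg = 0x120640 := rfl
    have hb : (UInt64.ofNat (Vorbis.Globals.log2_4.beg + i)).toNat = 0x120640 + i := by
      rw [e0, UInt64.toNat_ofNat']
      omega
    rw [el.readLE _ 1 (by omega) (by omega) (by omega)]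
    exact hfr.sh7 i hi
  · apply hfr.same.trans
    apply hs.mono
    intro s hs' a h1 h2
    have hz := hall s hs'
    have eB : A.1.B = g.A0.1.B := hfr.ext.B
    have eL : A.1.L = g.A0.1.L := hfr.ext.L
    have eRA : g.RA = (g.e.reg .rsp).toNat := rfl
    have ef : g.f = (g.e.reg .rdi).toNat := rfl
    unfold SpanOK at hz
    unfold StartDecoder.footprint StartDecoder.writes
    rcases hz with h | h | h | h | h | h | h | h | h | h | ⟨_, h | h | h⟩
    · exact ⟨_, List.mem_cons_self, by simp only [depth]; omega, by simp only []; omega⟩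
    · exact ⟨_, List.mem_cons_self, by simp only [depth]; omega, by simp only []; omega⟩
    · exact ⟨_, List.mem_cons_self, by simp only [depth]; omega, by simp only []; omega⟩
    all_goals first
      | exact ⟨_, List.mem_cons_of_mem _ List.mem_cons_self, by simp only [vblock, voff, Block.span]; omega,
          by simp only [vblock, voff, Block.span]; omega⟩
      | exact ⟨_, List.mem_cons_of_mem _ (List.mem_cons_of_mem _ (List.mem_cons_of_mem _ (List.mem_cons_of_mem _
          List.mem_cons_self))), by simp only [shadowSpan]; omega, by simp only [shadowSpan]; omega⟩


/-- The point of the hand-over, with the zero rest weakened to start at `residue_count`: what F1 carries. -/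
theorem mid6_of {u₀ : State} {g : Ghost} {A : Arena × List Obj} {v : State} (hb : BodyF1 u₀ g A v) :
    Mid g 5 5 6 A.1 A v.mem := by
  have h := Mid.of_sd5 hb.sd hb.own
  obtain ⟨b1, b2, b3, b4, b5, b6, b7, b8, b9, b10, b11, b12, b13⟩ := h
  refine ⟨b1, b2, b3, b4, b5, b6, b7, b8, b9, b10, b11, b12, ?_⟩
  unfold RestZero at b13 ⊢
  have e5 : restFrom 5 = 176 := rfl
  have e6 : restFrom 6 = 320 := rfl
  rw [e5] at b13
  rw [e6]
  exact b13.mono (by omega) (by omega)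

/-- **THE POINT `Mid g 5 5 6` OVER A FOOTPRINT INSIDE THE ZONES, possibly with an allocation** (the ghost arena grows from `A` to
`A'`: `Mid.frame` cannot be used over `setup_malloc`, which changes the memory AND the ghost at once): the memory-independent and
the arena-dependent clauses are given for the new state, the rest is carried. -/
theorem mid_step {g : Ghost} {Ac : Arena} {A A' : Arena × List Obj} {al : Bool} {ws : List Span} {m m' : Mem}
    (hm : Mid g 5 5 6 Ac A m) (hl : Loc g A) (hs : Mem.SameExcept ws m m')
    (hall : ∀ s, s ∈ ws → SpanOK g al A.1.B A.1.L s) (henv : Env (g.Blk A') (g.Live A') m')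
    (harena : ArenaOK A'.1 A'.2 m' g.f) (hno : A'.1.temps = []) (hext : A.1.Extends A'.1)
    (hbits : Bits (g.Blk A') g.len m' g.f) : Mid g 5 5 6 Ac A' m' := by
  have hl' := hl
  obtain ⟨a1, a2, a3, a4, a5, a6, a7, a8, a9⟩ := hl'
  -- the windows of `*f`
  have he : ObjEq [(0, 8), (24, 48), (152, 176), (320, 1480), (1749, 1750), (1784, 1788)] m g.f m' g.f := by
    apply objEq_of hl hs hall
    intro w hw
    simp only [List.mem_cons, List.mem_nil_iff, or_false] at hw
    rcases hw with rfl | rfl | rfl | rfl | rfl | rfl <;> simp only [] <;> omega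
  have heown : ObjEq (Own.winsAt 5) m g.f m' g.f := by
    apply objEq_of hl hs hall
    intro w hw
    have e : Mid.hi 5 = 176 := rfl
    simp only [Own.winsAt, e, List.mem_cons, List.mem_nil_iff, or_false] at hw
    rcases hw with rfl | rfl | rfl <;> simp only [] <;> omega
  have hehd : ObjEq HeaderOK.wins m g.f m' g.f := by
    apply objEq_of hl hs hall
    intro w hw
    simp only [HeaderOK.wins, List.mem_cons, List.mem_nil_iff, or_false] at hw
    rcases hw with rfl | rfl <;> simp only [] <;> omega
  -- every block of the configuration arena is kept
  have hk : ∀ B, Ac.Blk B → B.Kept m m' := by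
    intro B hB
    have hB' : A.1.Blk B := hB.mono hm.extc
    have hin := arena_inside hm.arena hB'
    have hst := hm.arena.blk_off_stack hB'
    apply Block.Kept.of_sameExcept hs
    · intro s hs'
      have hz := hall s hs'
      unfold SpanOK at hz
      rcases hz with h | h | h | h | h | h | h | h | h | h | ⟨_, h | h | h⟩ <;> omega
    · omega
  -- the constants of the frame
  have e8 := stack_eqOn hl hs hall (g.R + 8) (g.R + 0x18) (by omega)
  have e20 := stack_eqOn hl hs hall (g.R + 0x20) (g.R + 0x28) (by omega)
  have hc := hm.consts
  have hconsts : SDFrameConsts 5 m' g.R := by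
    refine ⟨hc.aligned, ?_, ?_, ?_, ?_⟩
    · rw [e8.u64 _ (by omega) (by omega) (by omega)]
      exact hc.shadowIdx
    · rw [e20.u32 _ (by omega) (by omega) (by omega)]
      exact hc.one20
    · intro h7
      rw [e8.u8 _ (by omega) (by omega) (by omega)]
      exact hc.z10 h7
    · intro h2 h11
      rw [e20.u32 _ (by omega) (by omega) (by omega)]
      exact hc.z24 h2 h11
  refine ⟨henv, hconsts, harena, hno, hm.extc.trans hext, hbits, ?_, ?_, ?_, hm.own.frame heown hk, ?_, ?_, ?_⟩
  · have e : stb_vorbis.first_decode m' g.f = stb_vorbis.first_decode m g.f := by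
      simp only [vacc, voff]
      exact he.u8 1749 (by decide)
    rw [e]
    exact hm.first
  · have e : stb_vorbis.discard_samples_deferred m' g.f = stb_vorbis.discard_samples_deferred m g.f := by
      simp only [vacc, voff]
      exact he.i32 1784 (by decide)
    rw [e]
    exact hm.discard0
  · exact hm.header.transfer hehd
  · intro h6
    exact absurd h6 (by omega)
  · intro h9
    exact absurd h9 (by omega)
  · intro o ho1 ho2
    have hz := hm.rest o ho1 ho2
    have e6 : restFrom 6 = 320 := rfl
    rw [e6] at ho1
    simp only [voff] at ho2
    rw [he (320, 1480) (by decide) o ho1 ho2]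
    exact hz


/-- **The segment's own cut points** (after each callee's return): the common part of a cut point, the hand-over carrier, the point
`Mid g 5 5 6` over the blocks of the snapshot `Ac` (the arena at the segment's entry), `rbp = f`. -/
structure Pt (u₀ : State) (g : Ghost) (pc : Word) (Ac : Arena) (A : Arena × List Obj) (s : State) : Prop where
  frame : Frame u₀ g pc A s
  hand : g.Hand A
  mid : Mid g 5 5 6 Ac A s.mem
  rbp : s.reg .rbp = addr g.f

/-- The entry assertion is the first of them. -/
theorem Pt.of_body {u₀ : State} {g : Ghost} {A : Arena × List Obj} {v : State} (hb : BodyF1 u₀ g A v) :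
    Pt u₀ g pc_F1 A.1 A v :=
  ⟨hb.frame, hb.hand, mid6_of hb, hb.rbp⟩

/-- The live objects inside the function contain those of the callers. -/
theorem own_frames_sub (g : Ghost) (others : List Obj) (o : Obj) (ho : o ∈ stackObjs g.frames ++ others) :
    o ∈ stackObjs g.frames' ++ others := by
  unfold Ghost.frames'
  rw [stackObjs_cons]
  rcases List.mem_append.mp ho with h1 | h2
  · exact List.mem_append_left _ (List.mem_append_right _ h1)
  · exact List.mem_append_right _ h2

/-- The shadow clause of a callee's precondition at the state `s` right after a `call` from a cut point (`rsp = R − 8`). -/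
theorem Pt.shadowPre {u₀ : State} {g : Ghost} {pc : Word} {Ac : Arena} {A : Arena × List Obj} {v s : State}
    (h : Pt u₀ g pc Ac A v) (hrsp : (s.reg .rsp).toNat + 8 = g.R) (hun : ShadowUntouched v.mem s.mem) :
    ShadowPre A.2 g.frames' s := by
  refine ⟨?_, h.frame.offText⟩
  rw [hrsp]
  exact h.frame.shadow.untouched hun

/-- `ReaderPre` of a reader called from a cut point with `rdi = f`. -/
theorem Pt.readerPre {u₀ : State} {g : Ghost} {pc : Word} {Ac : Arena} {A : Arena × List Obj} {v s : State}
    (h : Pt u₀ g pc Ac A v) (hrsp : (s.reg .rsp).toNat + 8 = g.R) (hun : ShadowUntouched v.mem s.mem)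
    (hrdi : (s.reg .rdi).toNat = g.f) (hbits : Bits (g.Blk A) g.len s.mem g.f) :
    ReaderPre A.2 g.frames' (g.Blk A) g.len s := by
  refine ⟨h.shadowPre hrsp hun, ?_, ?_⟩
  · rw [hrdi]
    exact ⟨h.mid.env.live, h.hand.obj.mono (own_frames_sub g A.2), fun hp => (h.hand.inp hp).mono (own_frames_sub g A.2)⟩
  · rw [hrdi]
    exact hbits

/-- `ArenaPre` of `setup_malloc` called from a cut point with `rdi = f`. -/
theorem Pt.arenaPre {u₀ : State} {g : Ghost} {pc : Word} {Ac : Arena} {A : Arena × List Obj} {v s : State}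
    (h : Pt u₀ g pc Ac A v) (hrsp : (s.reg .rsp).toNat + 8 = g.R) (hun : ShadowUntouched v.mem s.mem)
    (hrdi : (s.reg .rdi).toNat = g.f) (ha : ArenaOK A.1 A.2 s.mem g.f) : ArenaPre A.1 A.2 g.frames' s := by
  refine ⟨h.shadowPre hrsp hun, ?_, ?_, h.hand.arenaText⟩
  · rw [hrdi]
    exact (h.hand.obj.mono (own_frames_sub g A.2)).blockLive
  · rw [hrdi]
    exact ha

/-- `error.spec`'s precondition at a call from a cut point with `rdi = f`. -/
theorem Pt.errorPre {u₀ : State} {g : Ghost} {pc : Word} {Ac : Arena} {A : Arena × List Obj} {v s : State}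
    (h : Pt u₀ g pc Ac A v) (hrsp : (s.reg .rsp).toNat + 8 = g.R) (hun : ShadowUntouched v.mem s.mem)
    (hrdi : (s.reg .rdi).toNat = g.f) : (error.spec A.2 g.frames').pre s := by
  refine ⟨h.shadowPre hrsp hun, ?_⟩
  rw [hrdi]
  exact h.hand.obj.mono (own_frames_sub g A.2)

/-- `Bits` over a footprint inside the zones that meets none of the readers' fields (a push, a store to `floor_count` /
`floor_config` / a spill slot, `setup_malloc`, `error`). -/
theorem bits_carry {g : Ghost} {ws : List Span} {m m' : Mem} {Blk : Block → Prop}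
    (hs : Mem.SameExcept ws m m')
    (hno : ∀ s, s ∈ ws → g.f + 1808 ≤ s.lo ∨ s.hi ≤ g.f + 48 ∨ (g.f + 72 ≤ s.lo ∧ s.hi ≤ g.f + 1488))
    (hb : Bits Blk g.len m g.f) : Bits Blk g.len m' g.f := by
  apply hb.frame_fields
  apply Bits.SameFields.of_sameExcept hs
  · intro w hw
    have := hno w hw
    omega
  · intro w hw
    have := hno w hw
    omega
  · intro w hw
    have := hno w hw
    omega
  · intro w hw
    have := hno w hw
    omega


/-- `lea r13d, [rax + 1]` with `rax < 64` (the result of `get_bits(f, 6)`): no wrap. -/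
theorem lea_val (x : Word) (h : x.toNat < 64) : (BitVec.setWidth 32 (x + 1).toBitVec).toNat = x.toNat + 1 := by
  rw [BitVec.toNat_setWidth, UInt64.toBitVec_add, BitVec.toNat_add]
  have e1 : x.toBitVec.toNat = x.toNat := rfl
  have e2 : (1 : UInt64).toBitVec.toNat = 1 := rfl
  rw [e1, e2]
  omega

/-- `imul esi, r13d, 0x63c` with `r13d = rax + 1 ≤ 64`: the size `1596 · floor_count`, no overflow. -/
theorem imul_val (x : Word) (h : x.toNat < 64) :
    (Word.ofBV (BitVec.setWidth 32 (x + 1).toBitVec * 1596#32)).toNat % 2 ^ 32 = 1596 * (x.toNat + 1) := by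
  rw [Vorbis.toNat_ofBV32, BitVec.toNat_mul, lea_val x h]
  have e2 : (1596#32 : BitVec 32).toNat = 1596 := rfl
  rw [e2]
  omega

/-- A footprint whose last window lies in the shadow region, of a callee that wrote no shadow byte: the window can be dropped. -/
theorem sameExcept_drop_shadow {ws : List Span} {s : Span} {m m' : Mem} (h : Mem.SameExcept (ws ++ [s]) m m')
    (hun : Mem.EqOn 0xC00000 0xE00000 m m') (hs : 0xC00000 ≤ s.lo ∧ s.hi ≤ 0xE00000) : Mem.SameExcept ws m m' := by
  intro a ha
  by_cases hin : 0xC00000 ≤ a.toNat ∧ a.toNat < 0xE00000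
  · exact hun a hin.1 hin.2
  · apply h
    intro w hw
    rcases List.mem_append.mp hw with h1 | h2
    · exact ha w h1
    · have e := List.mem_singleton.mp h2
      subst e
      omega

/-- **After `setup_malloc` returned a block** (the ghost arena grew by `pushSetup n`, the object list by the new block): the
environment of a check site, the hand-over carrier, `Bits` and `temps = []` for the grown ghost. -/
theorem Pt.alloc {u₀ : State} {g : Ghost} {pc : Word} {Ac : Arena} {A : Arena × List Obj} {v : State} {m' : Mem} {n : Nat}
    (hp : Pt u₀ g pc Ac A v)
    (harena : ArenaOK (A.1.pushSetup n) (A.1.newSetupObj n :: A.2) m' g.f)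
    (hsh : ShadowInv (A.1.newSetupObj n :: A.2) g.frames' g.R m') (hbits : Bits (g.Blk A) g.len m' g.f) :
    Env (g.Blk (A.1.pushSetup n, A.1.newSetupObj n :: A.2)) (g.Live (A.1.pushSetup n, A.1.newSetupObj n :: A.2)) m' ∧
      g.Hand (A.1.pushSetup n, A.1.newSetupObj n :: A.2) ∧
      Bits (g.Blk (A.1.pushSetup n, A.1.newSetupObj n :: A.2)) g.len m' g.f ∧
      (A.1.pushSetup n).temps = [] ∧
      (∀ o, o ∈ A.1.newSetupObj n :: A.2 → L.textHi ≤ o.base) := by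
  have hext : A.1.Extends (A.1.pushSetup n) := A.1.extends_pushSetup n
  have hh' : g.Hand (A.1.pushSetup n, A.1.newSetupObj n :: A.2) :=
    HandOK.mono hp.hand hext (fun o ho => List.mem_cons_of_mem _ ho)
  have hx : BlkOK (listBlk (objBlock g.f :: fixedBlocks g.len)) := hp.mid.env.ok.sub (fun B hB => runBlk_extra hB)
  have hok : BlkOK (g.Blk (A.1.pushSetup n, A.1.newSetupObj n :: A.2)) := by
    apply harena.runBlk_ok hx
    intro C hC
    rcases List.mem_cons.mp hC with rfl | hm
    · exact hh'.objOut
    · exact hh'.outside C hm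
  have hlive : BlkLive (g.Blk (A.1.pushSetup n, A.1.newSetupObj n :: A.2))
      (g.Live (A.1.pushSetup n, A.1.newSetupObj n :: A.2)) := by
    apply harena.runBlk_live (fun o ho => List.mem_append_right _ ho)
    have hsub : BlkLive (listBlk (objBlock g.f :: fixedBlocks g.len)) (g.Live A) :=
      hp.mid.env.live.sub (fun B hB => runBlk_extra hB)
    refine BlkLive.mono hsub ?_
    intro x hx'
    obtain ⟨o, ho, hb⟩ := hx'
    refine ⟨o, ?_, hb⟩
    rcases List.mem_append.mp ho with h1 | h2
    · exact List.mem_append_left _ h1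
    · exact List.mem_append_right _ (List.mem_cons_of_mem _ h2)
  refine ⟨⟨hsh.covers, hok, hlive⟩, hh', ?_, ?_, ?_⟩
  · apply hbits.reblk
    · exact runBlk_extra List.mem_cons_self
    · exact runBlk_extra (List.mem_cons_of_mem _ List.mem_cons_self)
  · rw [Arena.pushSetup_temps]
    exact hp.mid.noTemps
  · intro o ho
    rcases List.mem_cons.mp ho with rfl | ho
    · have := hp.hand.arenaText
      unfold Arena.newSetupObj Arena.setupObj
      simp only
      omega
    · exact hp.frame.offText o ho


/-- **The exit into the floor loop** (0x11526a, `AtF2` with `i = 0`): the cut point's parts, the two spill slots just zeroed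
(`i` at `[R+18H]`, `longest_floorlist` at `[R+28H]`), FL1 and the floor block — a block allocated since the snapshot `A5`. -/
theorem atF2_of {u₀ : State} {g : Ghost} {A5 : Arena} {A : Arena × List Obj} {w : State} (hp : Pt u₀ g pc_F2 A5 A w)
    (hcnt : w.mem.u32 (g.R + 0x18) = 0) (hlf : w.mem.u32 (g.R + 0x28) = 0)
    (hfcb : 1 ≤ stb_vorbis.floor_count w.mem g.f ∧ stb_vorbis.floor_count w.mem g.f ≤ 64)
    (hblk : Since A5 A.1 ⟨stb_vorbis.floor_config w.mem g.f, Off.sizeof.Floor * (stb_vorbis.floor_count w.mem g.f).toNat⟩) :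
    AtF2 u₀ g 0 w := by
  have hi32 : w.mem.i32 (g.R + 0x28) = 0 := by
    rw [Mem.i32_of_u32_lt _ _ (by rw [hlf]; omega), hlf]
    rfl
  refine ⟨A5, A, ?_⟩
  exact
    { frame := hp.frame
      hand := hp.hand
      mid := hp.mid
      rbp := hp.rbp
      cnt := hcnt
      i_le := by omega
      floors := FloorsUpTo.zero ⟨hfcb, hblk⟩
      lfl :=
        { ge := LongestOK.zero _ _ _
          lo := by rw [hi32]; omega
          hi := by rw [hi32]; omega
          two := fun h => absurd h (by omega) } }

/-- **The error exit** (0x113b22 with eax = 0 after `error(f, VORBIS_outofmem)`): SD.ERR from the point — `residue_config` and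
`mapping` are still NULL (the zero rest). -/
theorem atERR_of {u₀ : State} {g : Ghost} {A5 : Arena} {A : Arena × List Obj} {w : State} (hp : Pt u₀ g pc_ERR A5 A w)
    (hrax : w.reg .rax = 0) : AtERR u₀ g w := by
  refine ⟨A, hp.frame, hp.hand, Or.inl ⟨?_, ?_⟩⟩
  · rw [hrax]
    rfl
  · exact hp.mid.failed (by omega) (hp.mid.h2_null (by omega) _) (hp.mid.h3_null (by omega) _) (hp.mid.h5_null (by omega) _)

/-- A cut point is carried along a jump that stores nothing (the memory, rsp, rbp, the flags' DF and MXCSR are those of the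
cut point). -/
theorem Pt.move {u₀ : State} {g : Ghost} {pc pc' : Word} {A5 : Arena} {A : Arena × List Obj} {v w : State}
    (hp : Pt u₀ g pc A5 A v) (hmem : w.mem = v.mem) (hrip : w.rip = pc') (hrsp : w.reg .rsp = v.reg .rsp)
    (hrbp : w.reg .rbp = v.reg .rbp) (hinv : abiInv w) : Pt u₀ g pc' A5 A w := by
  have hfr := hp.frame
  refine ⟨?_, hp.hand, ?_, ?_⟩
  · exact
      { entry := hfr.entry
        rip := hrip
        rsp := by rw [hrsp]; exact hfr.rsp
        shadowIdx := by rw [hmem]; exact hfr.shadowIdx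
        saved_rbx := by rw [hmem]; exact hfr.saved_rbx
        saved_rbp := by rw [hmem]; exact hfr.saved_rbp
        saved_r12 := by rw [hmem]; exact hfr.saved_r12
        saved_r13 := by rw [hmem]; exact hfr.saved_r13
        saved_r14 := by rw [hmem]; exact hfr.saved_r14
        saved_r15 := by rw [hmem]; exact hfr.saved_r15
        saved_ra := by rw [hmem]; exact hfr.saved_ra
        code := by rw [hmem]; exact hfr.code
        inv := hinv
        shadow := by rw [hmem]; exact hfr.shadow
        offText := hfr.offText
        ext := hfr.ext
        callers := hfr.callers
        sh7 := by rw [hmem]; exact hfr.sh7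
        same := by rw [hmem]; exact hfr.same }
  · rw [hmem]
    exact hp.mid
  · rw [hrbp]
    exact hp.rbp

end Vorbis.Spec.start_decoder_F1
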